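-- pv_equiv track=rewrite | github.com/mspagon/challenges | random_delete_later.py | count_competitors
-- ===== SOURCE A (Python) =====
-- from collections import defaultdict
--
-- def count_competitors(reviews: list, competitors: list):
--     # Initialize a dictionary with keys of all the competitor names whose values are set to 0.
--     competitors_count = {k: 0 for k in competitors}
--     for review in reviews:
--         # Use a set to mark if a competitor was mentioned in the review so it is not counted more than once.
--         seen = set()
--         for word in review:
--             if word in competitors_count:
--                 seen.add(word)
--
--         for competitor in seen:
--             competitors_count[competitor] += 1
--
--     return sort_competitors(competitors_count)
--
-- def sort_competitors(competitors_count: dict):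
--     '''Sorts a dictionary of competitor counts and breaks ties alphabetically. Returns a list of competitor names.'''
--     group_by_count = defaultdict(list)
--     for competitor, count in competitors_count.items():
--         group_by_count[count].append(competitor)
--
--     competitors = []
--     for count, competitor in sorted(group_by_count.items(), reverse=True):
--         if count > 0:
--             for name in sorted(competitor):
--                 competitors.append(name)
--     return competitors
-- ===== SOURCE B (Python) =====
-- def count_competitors(reviews: list, competitors: list):
--     # Count, per competitor, the number of reviews mentioning it, then rank with
--     # one flat stable sort on the composite key (-count, name); keep positive counts.
--     review_sets = [set(review) for review in reviews]
--     cnt = {c: sum(1 for s in review_sets if c in s) for c in set(competitors)}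
--     ranked = sorted(cnt, key=lambda c: (-cnt[c], c))
--     return [c for c in ranked if cnt[c] > 0]
-- ===== Notes on version B (the rewrite author's own statement) =====
-- stated objective: simpler
-- what changed: Replaces the per-review dict-increment loop plus the defaultdict bucket-grouping/two-level sort with a direct per-competitor count over precomputed review sets and ONE flat stable sort on the composite key (-count, name), filtered to positive counts.
import Mathlib
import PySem

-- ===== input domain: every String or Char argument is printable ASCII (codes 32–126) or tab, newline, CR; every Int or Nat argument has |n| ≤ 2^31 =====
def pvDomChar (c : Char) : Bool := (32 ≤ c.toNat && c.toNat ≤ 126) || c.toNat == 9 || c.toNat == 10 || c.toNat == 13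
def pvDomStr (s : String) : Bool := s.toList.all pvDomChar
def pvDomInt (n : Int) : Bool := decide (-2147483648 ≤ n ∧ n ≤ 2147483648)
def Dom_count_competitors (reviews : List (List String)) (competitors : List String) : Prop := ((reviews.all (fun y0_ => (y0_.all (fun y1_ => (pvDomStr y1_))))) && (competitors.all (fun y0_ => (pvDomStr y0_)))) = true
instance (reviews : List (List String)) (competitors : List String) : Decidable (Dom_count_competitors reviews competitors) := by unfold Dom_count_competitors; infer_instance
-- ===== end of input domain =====

-- B replaces A's per-review dict increments and defaultdict bucket grouping with a per-competitor
-- count and one flat composite-key sort (objective: simpler).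


-- ===== PORT A =====
-- sort_competitors helper of A, transliterated.
def pySortCompetitors (counts : PySem.Dict String Int) : List String :=
  let group : PySem.Dict Int (List String) :=
    counts.items.foldl (fun g p => g.modify p.2 [] (· ++ [p.1])) PySem.Dict.empty
  -- sorted(group_by_count.items(), reverse=True): the Int keys of group are distinct, so
  -- Python's tuple comparison is decided by the first component — key = fst is exact here.
  (PySem.List.sorted group.items (fun p => p.1) true).foldl
    (fun out p =>
      if p.1 > 0 then
        (PySem.List.sorted p.2 (fun x => x) false).foldl (fun o nm => o ++ [nm]) out
      else out) []

def count_competitors (reviews : List (List String)) (competitors : List String) : List String :=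
  let counts0 : PySem.Dict String Int :=
    competitors.foldl (fun d k => d.insert k 0) PySem.Dict.empty
  let counts := reviews.foldl (fun d review =>
      let seen : PySem.Set String :=
        review.foldl (fun s w => if d.contains w then PySem.Set.add s w else s) PySem.Set.empty
      -- incrementing a fixed +1 per seen element: the result is independent of Python's
      -- set iteration order (dict key order is unchanged by the in-place updates)
      seen.foldl (fun d' c => d'.modify c 0 (· + 1)) d) counts0
  pySortCompetitors counts

-- ===== PORT B =====
-- sum(1 for s in review_sets if c in s)
def altCnt (reviewSets : List (PySem.Set String)) (c : String) : Int :=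
  reviewSets.foldl (fun acc s => acc + (if c ∈ s then 1 else 0)) 0

def count_competitors_alt (reviews : List (List String)) (competitors : List String) : List String :=
  let reviewSets : List (PySem.Set String) := reviews.map (fun r => PySem.Set.ofList r)
  let names : PySem.Set String := PySem.Set.ofList competitors
  -- sorted(cnt, key=lambda c: (-cnt[c], c)): Python's tuple comparison is lexicographic,
  -- which is exactly the order of Int ×ₗ String; the key is injective (second component),
  -- so the result does not depend on the set's iteration order.
  let ranked := PySem.List.sorted names (fun c => toLex (-(altCnt reviewSets c), c)) false
  ranked.filter (fun c => altCnt reviewSets c > 0)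

-- ===== PRECONDITION & SPEC =====
def Spec_count_competitors (reviews : List (List String)) (competitors : List String) (out : List String) : Prop := out = count_competitors_alt reviews competitors
instance (reviews : List (List String)) (competitors : List String) (out : List String) : Decidable (Spec_count_competitors reviews competitors out) := by unfold Spec_count_competitors; infer_instance

-- ===== CLAIM (what is proved, stated in full; the proofs are below) =====
def Claim_equal_count_competitors : Prop := ∀ (reviews : List (List String)) (competitors : List String), Dom_count_competitors reviews competitors → Spec_count_competitors reviews competitors (count_competitors reviews competitors)

-- ===== LEMMAS AND PROOFS =====

-- number of reviews mentioning c (the common count both programs compute)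
def pvN (reviews : List (List String)) (c : String) : Int :=
  (reviews.countP (fun r => decide (c ∈ r)) : Int)

theorem pv_altCnt_aux (c : String) : ∀ (rs : List (List String)) (acc : Int),
    rs.foldl (fun acc r => acc + (if c ∈ PySem.Set.ofList r then 1 else 0)) acc
      = acc + (rs.countP (fun r => decide (c ∈ r)) : Int) := by
  intro rs
  induction rs with
  | nil => intro acc; simp
  | cons r rt ih =>
    intro acc
    rw [List.foldl_cons, ih, List.countP_cons]
    by_cases h : c ∈ r <;> simp [h, PySem.Set.mem_ofList] <;> push_cast <;> omega

theorem pv_altCnt (reviews : List (List String)) (c : String) :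
    altCnt (reviews.map (fun r => PySem.Set.ofList r)) c = pvN reviews c := by
  simp only [altCnt, List.foldl_map, pvN]
  simpa using pv_altCnt_aux c reviews 0

-- the zero-initialisation loop: every getD-with-default-0 is 0
theorem pv_counts0_getD : ∀ (ks : List String) (d : PySem.Dict String Int),
    (∀ c, d.getD c 0 = 0) → ∀ c,
    (ks.foldl (fun d k => d.insert k 0) d).getD c 0 = 0 := by
  intro ks
  induction ks with
  | nil => intro d h c; simpa using h c
  | cons k kt ih =>
    intro d h c
    refine ih _ ?_ c
    intro c'
    rw [PySem.Dict.getD_insert]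
    split <;> simp [h]

theorem pv_counts0_keys (ks : List String) :
    (ks.foldl (fun d k => d.insert k (0 : Int)) PySem.Dict.empty).keys
      = PySem.Set.ofList ks := by
  rw [PySem.Dict.keys_foldl_insert ks (fun _ _ => (0 : Int))]
  simp [PySem.Dict.keys_empty, PySem.Set.update_nil_left]

-- the 'seen' loop is set(filter(contains, review))
theorem pv_seen_foldl (p : String → Bool) : ∀ (review : List String) (s : PySem.Set String),
    review.foldl (fun s w => if p w then PySem.Set.add s w else s) s
      = (review.filter p).foldl PySem.Set.add s := by
  intro review
  induction review with
  | nil => intro s; simp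
  | cons w wt ih =>
    intro s
    by_cases h : p w <;> simp [List.filter_cons, h, ih]

-- updating a set with elements it already has changes nothing
theorem pv_update_subset : ∀ (xs : List String) (s : PySem.Set String),
    (∀ x ∈ xs, x ∈ s) → PySem.Set.update s xs = s := by
  intro xs
  induction xs with
  | nil => intro s _; rfl
  | cons x xt ih =>
    intro s h
    rw [PySem.Set.update_eq_foldl, List.foldl_cons,
        PySem.Set.add_of_mem (h x (by simp)), ← PySem.Set.update_eq_foldl]
    exact ih s (fun y hy => h y (by simp [hy]))

-- one review step of A's counting loop
theorem pv_step (K : List String) (d : PySem.Dict String Int) (hk : d.keys = K)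
    (review : List String) :
    (((review.foldl (fun s w => if d.contains w then PySem.Set.add s w else s)
        PySem.Set.empty).foldl (fun d' c => d'.modify c 0 (· + 1)) d).keys = K) ∧
    (∀ c, ((review.foldl (fun s w => if d.contains w then PySem.Set.add s w else s)
        PySem.Set.empty).foldl (fun d' c => d'.modify c 0 (· + 1)) d).getD c 0
      = d.getD c 0 + (if c ∈ review ∧ c ∈ K then 1 else 0)) := by
  have hseen : review.foldl (fun s w => if d.contains w then PySem.Set.add s w else s)
      PySem.Set.empty = PySem.Set.ofList (review.filter (fun w => d.contains w)) := by
    rw [pv_seen_foldl, PySem.Set.ofList_eq_foldl]; rfl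
  have hmem : ∀ c, c ∈ PySem.Set.ofList (review.filter (fun w => d.contains w)) ↔
      (c ∈ review ∧ c ∈ K) := by
    intro c
    rw [PySem.Set.mem_ofList, List.mem_filter, PySem.Dict.contains_iff_mem_keys, hk]
  constructor
  · rw [hseen, PySem.Dict.keys_foldl_modify, hk]
    exact pv_update_subset _ _ (fun x hx => by rw [← hk, ← PySem.Dict.contains_iff_mem_keys]
                                               exact (List.mem_filter.mp ((PySem.Set.mem_ofList _ _).mp hx)).2)
  · intro c
    rw [hseen, PySem.Dict.getD_foldl_modify_add_one]
    congr 1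
    by_cases h : c ∈ review ∧ c ∈ K
    · rw [List.count_eq_one_of_mem (PySem.Set.nodup_ofList _) ((hmem c).mpr h)]
      simp [h]
    · rw [List.count_eq_zero_of_not_mem (fun hc => h ((hmem c).mp hc))]
      simp [h]

-- the full counting loop
theorem pv_loop (K : List String) : ∀ (rs : List (List String)) (d : PySem.Dict String Int),
    d.keys = K →
    ((rs.foldl (fun d review =>
        (review.foldl (fun s w => if d.contains w then PySem.Set.add s w else s)
          PySem.Set.empty).foldl (fun d' c => d'.modify c 0 (· + 1)) d) d).keys = K) ∧
    (∀ c, (rs.foldl (fun d review =>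
        (review.foldl (fun s w => if d.contains w then PySem.Set.add s w else s)
          PySem.Set.empty).foldl (fun d' c => d'.modify c 0 (· + 1)) d) d).getD c 0
      = d.getD c 0 + ((rs.countP (fun r => decide (c ∈ r ∧ c ∈ K))) : Int)) := by
  intro rs
  induction rs with
  | nil => intro d hk; exact ⟨hk, by simp⟩
  | cons r rt ih =>
    intro d hk
    obtain ⟨hk1, hv1⟩ := pv_step K d hk r
    obtain ⟨hk2, hv2⟩ := ih _ hk1
    refine ⟨hk2, ?_⟩
    intro c
    rw [List.foldl_cons, hv2 c, hv1 c, List.countP_cons]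
    by_cases h : c ∈ r ∧ c ∈ K <;> simp [h] <;> push_cast <;> omega

-- append-style loops
theorem pv_foldl_push {α : Type} : ∀ (l : List α) (out : List α),
    l.foldl (fun o nm => o ++ [nm]) out = out ++ l := by
  intro l out
  simpa using PySem.List.foldl_append_eq_flatMap (fun x => [x]) l out

theorem pv_foldl_ite_append {α β : Type} (P : α → Prop) [DecidablePred P] (g : α → List β) :
    ∀ (l : List α) (acc : List β),
    l.foldl (fun acc x => if P x then acc ++ g x else acc) acc
      = acc ++ (l.filter (fun x => decide (P x))).flatMap g := by
  intro l
  induction l with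
  | nil => intro acc; simp
  | cons x xt ih =>
    intro acc
    by_cases h : P x <;> simp [List.filter_cons, h, ih]

theorem pv_flatMap_ite {α β : Type} (P : α → Prop) [DecidablePred P] (g : α → List β) :
    ∀ (l : List α),
    l.flatMap (fun x => if P x then g x else [])
      = (l.filter (fun x => decide (P x))).flatMap g := by
  intro l
  induction l with
  | nil => rfl
  | cons x xt ih =>
    by_cases h : P x <;> simp [List.filter_cons, h, ih]

theorem pv_flatMap_congr {α β : Type} {l : List α} {f g : α → List β}
    (h : ∀ a ∈ l, f a = g a) : l.flatMap f = l.flatMap g := by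
  rw [List.flatMap_def, List.flatMap_def, List.map_congr_left h]

-- the buckets K.filter (n · == v), v over a nodup cover of n(K), partition K
theorem pv_partition (n : String → Int) : ∀ (vs : List Int) (L : List String),
    vs.Nodup → (∀ c ∈ L, n c ∈ vs) →
    (vs.flatMap (fun v => L.filter (fun c => n c == v))).Perm L := by
  intro vs
  induction vs with
  | nil =>
    intro L _ hcov
    have : L = [] := List.eq_nil_iff_forall_not_mem.mpr (fun c hc => by simpa using hcov c hc)
    simp [this]
  | cons v vt ih =>
    intro L hnd hcov
    rw [List.flatMap_cons]
    have hrest : vt.flatMap (fun v' => L.filter (fun c => n c == v'))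
        = vt.flatMap (fun v' => (L.filter (fun c => !(n c == v))).filter (fun c => n c == v')) := by
      refine pv_flatMap_congr ?_
      intro v' hv'
      have hne : v' ≠ v := by rintro rfl; exact (List.nodup_cons.mp hnd).1 hv'
      rw [List.filter_filter]
      refine (List.filter_congr ?_).symm
      intro c _
      by_cases h : n c = v' <;> simp [h, hne]
    rw [hrest]
    have hIH : (vt.flatMap (fun v' => (L.filter (fun c => !(n c == v))).filter
        (fun c => n c == v'))).Perm (L.filter (fun c => !(n c == v))) := by
      refine ih _ (List.nodup_cons.mp hnd).2 ?_
      intro c hc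
      have hcL := List.mem_filter.mp hc
      have := hcov c hcL.1
      rcases List.mem_cons.mp this with h | h
      · exfalso; revert hcL; simp [h]
      · exact h
    exact (List.Perm.append_left _ hIH).trans (List.filter_append_perm _ L)

-- characterisation of A's sort_competitors on a dict whose items are K.map (c, n c)
theorem pv_sort (counts : PySem.Dict String Int) (K : List String) (n : String → Int)
    (hK : K.Nodup) (hitems : counts.items = K.map (fun c => (c, n c))) :
    pySortCompetitors counts
      = (PySem.List.sorted K (fun c => toLex (-(n c), c)) false).filter
          (fun c => decide (n c > 0)) := by
  simp only [pySortCompetitors]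
  set g : PySem.Dict Int (List String) :=
    counts.items.foldl (fun g p => g.modify p.2 [] (· ++ [p.1])) PySem.Dict.empty with hg
  have hgfold : g = K.foldl (fun g c => g.modify (n c) [] (· ++ [c])) PySem.Dict.empty := by
    rw [hg, hitems, List.foldl_map]
  have hkeys : g.keys = PySem.Set.ofList (K.map n) := by
    rw [hgfold, PySem.Dict.keys_foldl_modify_key K n [] (fun _ c v => v ++ [c])]
    simp [PySem.Dict.keys_empty, PySem.Set.update_nil_left]
  have hVnd : g.keys.Nodup := by rw [hkeys]; exact PySem.Set.nodup_ofList _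
  have hgetD : ∀ v, g.getD v [] = K.filter (fun c => n c == v) := by
    intro v
    have hmapf : K.foldl (fun g c => g.modify (n c) [] (· ++ [c])) PySem.Dict.empty
        = (K.map (fun c => (n c, c))).foldl
            (fun d p => d.modify p.1 [] (· ++ [p.2])) PySem.Dict.empty := by
      rw [List.foldl_map]
    rw [hgfold, hmapf, PySem.Dict.getD_foldl_modify_append]
    simp [List.filter_map, List.map_map, Function.comp_def]
  have hitems2 : g.items = g.keys.map (fun v => (v, K.filter (fun c => n c == v))) := by
    rw [PySem.Dict.items_eq_map_keys g hVnd []]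
    exact List.map_congr_left (fun v _ => by rw [hgetD])
  set S := PySem.List.sorted g.items (fun p => p.1) true with hS
  have hSperm : S.Perm g.items := PySem.List.sorted_perm _ _ _
  have hmemS : ∀ p ∈ S, p.2 = K.filter (fun c => n c == p.1) := by
    intro p hp
    have hpI : p ∈ g.items := hSperm.mem_iff.mp hp
    rw [hitems2] at hpI
    obtain ⟨v, _, rfl⟩ := List.mem_map.mp hpI
    rfl
  have hfst : (S.map (fun p => p.1)).Nodup := by
    have h1 : (g.items.map (fun p : Int × List String => p.1)).Nodup := by
      rw [hitems2, List.map_map]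
      simpa [Function.comp_def] using hVnd
    exact ((hSperm.map _).symm).nodup h1
  have hSstrict : S.Pairwise (fun a b => b.1 < a.1) := by
    have hle := PySem.List.sorted_pairwise_rev g.items (fun p => p.1)
    have hne : S.Pairwise (fun a b => a.1 ≠ b.1) := List.pairwise_map.mp hfst
    rw [← hS] at hle
    exact (hle.and hne).imp (fun h => lt_of_le_of_ne h.1 (Ne.symm h.2))
  have hmemn : ∀ p ∈ S, ∀ a ∈ p.2, a ∈ K ∧ n a = p.1 := by
    intro p hp a ha
    rw [hmemS p hp] at ha
    have := List.mem_filter.mp ha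
    exact ⟨this.1, by simpa using this.2⟩
  -- B's single composite-key sort equals A's buckets flattened
  have hsorted_eq : PySem.List.sorted K (fun c => toLex (-(n c), c)) false
      = S.flatMap (fun p => PySem.List.sorted p.2 (fun x => x) false) := by
    apply PySem.List.sorted_eq_of_perm_of_pairwise_lt
    · have h1 : (S.flatMap (fun p => PySem.List.sorted p.2 (fun x => x) false)).Perm
          (S.flatMap (fun p => p.2)) :=
        List.Perm.flatMap_left S (fun p _ => PySem.List.sorted_perm _ _ _)
      have h2 : (S.flatMap (fun p : Int × List String => p.2)).Perm
          (g.items.flatMap (fun p => p.2)) := List.Perm.flatMap_right _ hSperm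
      have h3 : g.items.flatMap (fun p => p.2)
          = (PySem.Set.ofList (K.map n)).flatMap (fun v => K.filter (fun c => n c == v)) := by
        rw [hitems2, List.flatMap_map, hkeys]
      have h4 := pv_partition n (PySem.Set.ofList (K.map n)) K (PySem.Set.nodup_ofList _)
        (fun c hc => (PySem.Set.mem_ofList _ _).mpr (List.mem_map_of_mem hc))
      exact ((h1.trans h2).trans (h3 ▸ List.Perm.refl _)).trans h4
    · rw [List.pairwise_flatMap]
      constructor
      · intro p hp
        have hnodup : (PySem.List.sorted p.2 (fun x => x) false).Nodup :=
          ((PySem.List.sorted_perm p.2 _ _).symm).nodup (by rw [hmemS p hp]; exact hK.filter _)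
        have hle := PySem.List.sorted_pairwise p.2 (fun x => x)
        refine List.Pairwise.imp_of_mem ?_ (hle.and hnodup)
        intro a b ha hb hab
        have hna := (hmemn p hp a ((PySem.List.mem_sorted _ _ _ _).mp ha)).2
        have hnb := (hmemn p hp b ((PySem.List.mem_sorted _ _ _ _).mp hb)).2
        exact Prod.Lex.toLex_lt_toLex.mpr
          (Or.inr ⟨by rw [hna, hnb], lt_of_le_of_ne hab.1 hab.2⟩)
      · refine List.Pairwise.imp_of_mem ?_ hSstrict
        intro p q hp hq hlt x hx y hy
        have hnx := (hmemn p hp x ((PySem.List.mem_sorted _ _ _ _).mp hx)).2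
        have hny := (hmemn q hq y ((PySem.List.mem_sorted _ _ _ _).mp hy)).2
        exact Prod.Lex.toLex_lt_toLex.mpr (Or.inl (by rw [hnx, hny]; omega))
  rw [hsorted_eq, List.filter_flatMap]
  have hbuckets : S.flatMap (fun p =>
        (PySem.List.sorted p.2 (fun x => x) false).filter (fun c => decide (n c > 0)))
      = S.flatMap (fun p =>
        if p.1 > 0 then PySem.List.sorted p.2 (fun x => x) false else []) := by
    refine pv_flatMap_congr ?_
    intro p hp
    by_cases h : p.1 > 0
    · rw [if_pos h]
      refine List.filter_eq_self.mpr ?_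
      intro a ha
      have := (hmemn p hp a ((PySem.List.mem_sorted _ _ _ _).mp ha)).2
      simp [this, h]
    · rw [if_neg h]
      refine List.filter_eq_nil_iff.mpr ?_
      intro a ha
      have := (hmemn p hp a ((PySem.List.mem_sorted _ _ _ _).mp ha)).2
      simp [this, h]
  rw [hbuckets, pv_flatMap_ite (fun p : Int × List String => p.1 > 0)
      (fun p => PySem.List.sorted p.2 (fun x => x) false) S]
  simp only [pv_foldl_push]
  rw [pv_foldl_ite_append (fun p : Int × List String => p.1 > 0)
      (fun p => PySem.List.sorted p.2 (fun x => x) false) S []]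
  simp

-- ===== VERDICT (by name: the statement is the Claim_ definition above) =====
theorem count_competitors_spec : Claim_equal_count_competitors := by
  intro reviews competitors _
  show count_competitors reviews competitors = count_competitors_alt reviews competitors
  simp only [count_competitors, count_competitors_alt]
  obtain ⟨hkeys, hval⟩ := pv_loop (PySem.Set.ofList competitors) reviews
    (competitors.foldl (fun d k => d.insert k 0) (PySem.Dict.empty : PySem.Dict String Int))
    (pv_counts0_keys competitors)
  have hnd : (reviews.foldl (fun d review =>
      (review.foldl (fun s w => if d.contains w then PySem.Set.add s w else s)
        PySem.Set.empty).foldl (fun d' c => d'.modify c 0 (· + 1)) d)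
      (competitors.foldl (fun d k => d.insert k 0) (PySem.Dict.empty : PySem.Dict String Int))).keys.Nodup := by
    rw [hkeys]; exact PySem.Set.nodup_ofList _
  have hitems : (reviews.foldl (fun d review =>
      (review.foldl (fun s w => if d.contains w then PySem.Set.add s w else s)
        PySem.Set.empty).foldl (fun d' c => d'.modify c 0 (· + 1)) d)
      (competitors.foldl (fun d k => d.insert k 0) (PySem.Dict.empty : PySem.Dict String Int))).items
      = (PySem.Set.ofList competitors).map (fun c => (c, pvN reviews c)) := by
    rw [PySem.Dict.items_eq_map_keys _ hnd 0, hkeys]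
    refine List.map_congr_left ?_
    intro c hc
    rw [hval c, pv_counts0_getD competitors PySem.Dict.empty
        (fun c' => PySem.Dict.getD_empty c' 0) c]
    have : reviews.countP (fun r => decide (c ∈ r ∧ c ∈ PySem.Set.ofList competitors))
        = reviews.countP (fun r => decide (c ∈ r)) :=
      List.countP_congr (fun r _ => by simp [hc])
    rw [this, pvN]
    ring
  rw [pv_sort _ (PySem.Set.ofList competitors) (pvN reviews)
      (PySem.Set.nodup_ofList _) hitems]
  simp only [pv_altCnt]
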